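-- pv_equiv track=rewrite | github.com/rivertw777/Algorithm | 프로그래머스/3/64064. 불량 사용자/불량 사용자.py | solution
-- ===== SOURCE A (Python) =====
-- def is_matching(user_id, banned_id):
--     if len(user_id) != len(banned_id):
--         return False
--
--     for i in range(len(user_id)):
--         if banned_id[i] != '*' and banned_id[i] != user_id[i]:
--             return False
--
--     return True
--
-- def dfs(same_lists, list_index, cur_list, answer_set):
--
--     for el in same_lists[list_index]:
--         if el in cur_list:
--             continue
--         cur_list.append(el)
--         if len(cur_list) == len(same_lists):
--             answer_set.add(tuple(sorted(cur_list)))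
--
--         if list_index + 1 < len(same_lists):
--             dfs(same_lists, list_index+1, cur_list, answer_set)
--         cur_list.remove(el)
--
-- def solution(user_ids, banned_ids):
--     answer = 0
--     answer_set = set()
--     same_lists = []
--     for banned_id in banned_ids:
--         same_list = []  # banned_id당 일치하는 아이디들
--         for user_id in user_ids:
--             if is_matching(user_id, banned_id):
--                 same_list.append(user_id)
--         same_lists.append(same_list)
--
--     new_tmp = []
--     dfs(same_lists, 0, new_tmp, answer_set)
--
--     return len(answer_set)
-- ===== SOURCE B (Python) =====
-- def solution(user_ids, banned_ids):
--     same_lists = [[u for u in user_ids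
--                    if len(u) == len(b) and all(bc == '*' or bc == uc for bc, uc in zip(b, u))]
--                   for b in banned_ids]
--     combos = [[]]
--     for lst in same_lists:
--         combos = [c + [u] for c in combos for u in lst if u not in c]
--     result = set()
--     for c in combos:
--         result.add(tuple(sorted(c)))
--     return len(result)
-- ===== Notes on version B (the rewrite author's own statement) =====
-- stated objective: alternative
-- what changed: Replaces A's recursive backtracking DFS over same_lists (with in-place cur_list mutation and a result set) by a flat iterative enumeration: build the cartesian product of the candidate lists level by level, keeping only tuples without repeated users, then collect the sorted tuples in a set.
import Mathlib
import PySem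

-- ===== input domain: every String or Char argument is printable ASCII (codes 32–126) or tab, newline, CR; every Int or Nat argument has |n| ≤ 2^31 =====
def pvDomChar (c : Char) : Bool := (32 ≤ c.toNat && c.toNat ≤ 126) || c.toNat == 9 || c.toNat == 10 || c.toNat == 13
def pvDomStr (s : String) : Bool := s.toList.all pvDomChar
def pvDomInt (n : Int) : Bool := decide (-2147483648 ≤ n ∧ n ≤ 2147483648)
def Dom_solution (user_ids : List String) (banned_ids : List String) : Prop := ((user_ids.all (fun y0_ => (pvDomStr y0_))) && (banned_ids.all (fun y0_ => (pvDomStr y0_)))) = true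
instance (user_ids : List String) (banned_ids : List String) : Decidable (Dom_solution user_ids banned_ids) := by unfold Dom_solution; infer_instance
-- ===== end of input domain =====

-- B replaces A's recursive backtracking DFS by an iteratively built cartesian product of the
-- candidate lists followed by a distinctness filter (objective: alternative, same result set).

-- ===== PORT A =====
-- is_matching: length check, then an index loop with early return False
def isMatching (user_id banned_id : String) : Bool :=
  if user_id.toList.length ≠ banned_id.toList.length then false
  else (List.range user_id.toList.length).all (fun i =>
    !((banned_id.toList.getD i ' ' != '*') && (banned_id.toList.getD i ' ' != user_id.toList.getD i ' ')))
    -- in-range indexing banned_id[i] / user_id[i] rendered with getD (i < length, so exact)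

-- dfs: the loop over same_lists[list_index]; the fuel argument rem = same_lists.length - list_index
-- makes the recursion structural (the rem = 0 arm is unreachable at the guarded recursive call);
-- cur_list.remove(el) restores cur, so the Lean code simply continues with cur.
def dfsLoop (sl : List (List String)) : Nat → Nat → List String → List String →
    PySem.Set (List String) → PySem.Set (List String)
  | _, _, [], _, acc => acc
  | rem, li, el :: rest, cur, acc =>
    if el ∈ cur then dfsLoop sl rem li rest cur acc
    else
      let cur' := cur ++ [el]
      let acc1 := if cur'.length = sl.length then PySem.Set.add acc (PySem.List.sorted cur' (fun x => x)) else acc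
      let acc2 := if li + 1 < sl.length then
          match rem with
          | 0 => acc1
          | rem' + 1 => dfsLoop sl rem' (li + 1) (sl.getD (li + 1) []) cur' acc1
        else acc1
      dfsLoop sl rem li rest cur acc2
termination_by rem _ els => (rem, els.length)

def solution (user_ids : List String) (banned_ids : List String) : Int :=
  let same_lists := banned_ids.foldl (fun acc b =>
    acc ++ [user_ids.foldl (fun sl u => if isMatching u b then sl ++ [u] else sl) []]) []
  -- dfs(same_lists, 0, [], answer_set): same_lists[0] rendered with getD
  -- (exact under Pre_solution, which guarantees same_lists ≠ [])
  let answer_set := dfsLoop same_lists same_lists.length 0 (same_lists.getD 0 []) [] PySem.Set.empty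
  (answer_set.length : Int)

-- ===== PORT B =====
def matchB (b u : String) : Bool :=
  u.toList.length == b.toList.length && (b.toList.zip u.toList).all (fun p => p.1 == '*' || p.1 == p.2)

def solution_alt (user_ids : List String) (banned_ids : List String) : Int :=
  let same_lists := banned_ids.map (fun b => user_ids.filter (fun u => matchB b u))
  let combos := same_lists.foldl (fun combos lst =>
    combos.flatMap (fun c => (lst.filter (fun u => u ∉ c)).map (fun u => c ++ [u]))) [[]]
  let result := combos.foldl (fun r c => PySem.Set.add r (PySem.List.sorted c (fun x => x))) PySem.Set.empty
  (result.length : Int)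

-- ===== PRECONDITION & SPEC =====
-- Pre_ excludes banned_ids = [], on which A's dfs indexes same_lists[0] and raises IndexError.
def Pre_solution (user_ids : List String) (banned_ids : List String) : Prop := banned_ids ≠ []
instance (user_ids : List String) (banned_ids : List String) : Decidable (Pre_solution user_ids banned_ids) := by unfold Pre_solution; infer_instance
def pvWitness_solution : List String × List String := (["ab", "xy"], ["a*"])

def Spec_solution (user_ids : List String) (banned_ids : List String) (out : Int) : Prop := out = solution_alt user_ids banned_ids
instance (user_ids : List String) (banned_ids : List String) (out : Int) : Decidable (Spec_solution user_ids banned_ids out) := by unfold Spec_solution; infer_instance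

-- ===== CLAIM (what is proved, stated in full; the proofs are below) =====
def Claim_equal_solution : Prop := ∀ (user_ids : List String) (banned_ids : List String), Dom_solution user_ids banned_ids → Pre_solution user_ids banned_ids → Spec_solution user_ids banned_ids (solution user_ids banned_ids)

-- ===== LEMMAS AND PROOFS =====

-- the reference product: prodR ls = all ways of picking one element from each list of ls, in order
def prodR : List (List String) → List (List String)
  | [] => [[]]
  | l :: ls => l.flatMap (fun x => (prodR ls).map (fun t => x :: t))

lemma prodR_cons_cons (el : String) (rest : List String) (ds : List (List String)) :
    prodR ((el :: rest) :: ds) = (prodR ds).map (el :: ·) ++ prodR (rest :: ds) := by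
  simp [prodR]

-- the two matchers agree
lemma rangeAll_zipAll : ∀ (bl ul : List Char), bl.length = ul.length →
    ((List.range ul.length).all (fun i => !((bl.getD i ' ' != '*') && (bl.getD i ' ' != ul.getD i ' '))))
    = (bl.zip ul).all (fun p => p.1 == '*' || p.1 == p.2) := by
  intro bl
  induction bl with
  | nil =>
    intro ul h
    cases ul with
    | nil => simp
    | cons u us => simp at h
  | cons b bs ih =>
    intro ul h
    cases ul with
    | nil => simp at h
    | cons u us =>
      simp only [List.length_cons, Nat.succ.injEq] at h
      simp only [List.length_cons, List.range_succ_eq_map, List.all_cons, List.all_map,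
        List.getD_cons_zero, List.getD_cons_succ, List.zip_cons_cons]
      rw [← ih us h]
      congr 1
      cases hb : (b == '*') <;> cases hbu : (b == u) <;> simp [hb, hbu, bne]

lemma match_eq (u b : String) : isMatching u b = matchB b u := by
  unfold isMatching matchB
  by_cases h : u.toList.length = b.toList.length
  · rw [if_neg (by simp [h])]
    rw [rangeAll_zipAll b.toList u.toList h.symm]
    rw [beq_iff_eq.mpr h, Bool.true_and]
  · rw [if_pos h]
    rw [beq_eq_false_iff_ne.mpr h, Bool.false_and]

-- the two same_lists are equal
lemma sl_eq (user_ids banned_ids : List String) :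
    banned_ids.foldl (fun acc b =>
      acc ++ [user_ids.foldl (fun sl u => if isMatching u b then sl ++ [u] else sl) []]) []
    = banned_ids.map (fun b => user_ids.filter (fun u => matchB b u)) := by
  have h1 : ∀ b : String,
      user_ids.foldl (fun sl u => if isMatching u b then sl ++ [u] else sl) []
      = user_ids.filter (fun u => matchB b u) := by
    intro b
    rw [show (fun sl u => if isMatching u b then sl ++ [u] else sl)
        = (fun sl u => if (fun x => matchB b x) u then sl ++ [u] else sl) by
      funext sl u; rw [match_eq]]
    rw [PySem.List.foldl_append_if]
    simp
  rw [show (fun (acc : List (List String)) b =>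
      acc ++ [user_ids.foldl (fun sl u => if isMatching u b then sl ++ [u] else sl) []])
      = (fun acc b => acc ++ [(fun x => user_ids.filter (fun u => matchB x u)) b]) by
    funext acc b; rw [h1]]
  rw [PySem.List.foldl_append_singleton_eq_map]
  simp

-- the pruned product relative to an already-chosen prefix c0
def ext (c0 : List String) : List (List String) → List (List String)
  | [] => [[]]
  | l :: ls => (l.filter (fun u => u ∉ c0)).flatMap (fun x => (ext (c0 ++ [x]) ls).map (fun t => x :: t))

-- B's iterated pruned product in terms of ext
lemma foldl_prodP (ls : List (List String)) : ∀ (init : List (List String)),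
    ls.foldl (fun combos lst => combos.flatMap (fun c => (lst.filter (fun u => u ∉ c)).map (fun u => c ++ [u]))) init
    = init.flatMap (fun c => (ext c ls).map (fun t => c ++ t)) := by
  induction ls with
  | nil => intro init; simp [ext]
  | cons l ls ih =>
    intro init
    rw [List.foldl_cons, ih]
    show (init.flatMap (fun c => (l.filter (fun u => u ∉ c)).map (fun u => c ++ [u]))).flatMap
        (fun c' => (ext c' ls).map (fun t => c' ++ t))
      = init.flatMap (fun c =>
          ((l.filter (fun u => u ∉ c)).flatMap (fun x => (ext (c ++ [x]) ls).map (fun t => x :: t))).map (fun t => c ++ t))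
    simp only [List.flatMap_assoc, List.map_flatMap, List.flatMap_map, List.map_map, Function.comp_def]
    congr 1; funext c; congr 1; funext x; congr 1; funext t
    simp

-- pruned product from a Nodup prefix = distinct selections of the full product
lemma mem_ext (ls : List (List String)) : ∀ (c0 : List String) (t : List String), c0.Nodup →
    (t ∈ ext c0 ls ↔ t ∈ prodR ls ∧ (c0 ++ t).Nodup) := by
  induction ls with
  | nil =>
    intro c0 t h0
    simp only [ext, prodR, List.mem_singleton]
    constructor
    · rintro rfl; exact ⟨rfl, by simpa using h0⟩
    · rintro ⟨rfl, -⟩; rfl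
  | cons l ls ih =>
    intro c0 t h0
    simp only [ext, prodR, List.mem_flatMap, List.mem_map, List.mem_filter, decide_not,
      Bool.not_eq_eq_eq_not, Bool.not_true, decide_eq_false_iff_not]
    constructor
    · rintro ⟨x, ⟨hxl, hxc0⟩, t', ht', rfl⟩
      have h0' : (c0 ++ [x]).Nodup := by
        simp [List.nodup_append, h0]
        intro a ha heq
        subst heq; exact hxc0 ha
      rcases (ih (c0 ++ [x]) t' h0').mp ht' with ⟨hp, hnd⟩
      exact ⟨⟨x, hxl, t', hp, rfl⟩, by simpa using hnd⟩
    · rintro ⟨⟨x, hxl, t', hp, rfl⟩, hnd⟩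
      have hxc0 : x ∉ c0 := by
        rcases List.nodup_append.mp hnd with ⟨-, -, hdisj⟩
        exact fun hx => hdisj x hx x (by simp) rfl
      have h0' : (c0 ++ [x]).Nodup := by
        simp [List.nodup_append, h0]
        intro a ha heq
        subst heq; exact hxc0 ha
      exact ⟨x, ⟨hxl, hxc0⟩, t', (ih (c0 ++ [x]) t' h0').mpr ⟨hp, by simpa using hnd⟩, rfl⟩

-- A's dfs: accumulator stays Nodup
lemma dfs_nodup (sl : List (List String)) : ∀ (rem : Nat) (els : List String) (li : Nat)
    (cur : List String) (acc : PySem.Set (List String)), acc.Nodup → (dfsLoop sl rem li els cur acc).Nodup := by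
  intro rem
  induction rem with
  | zero =>
    intro els
    induction els with
    | nil => intro li cur acc h; simpa [dfsLoop] using h
    | cons el rest ihe =>
      intro li cur acc h
      rw [dfsLoop]
      have hacc1 : (if (cur ++ [el]).length = sl.length then
          PySem.Set.add acc (PySem.List.sorted (cur ++ [el]) (fun x => x)) else acc).Nodup := by
        split
        · exact PySem.Set.nodup_add _ _ h
        · exact h
      split
      · exact ihe li cur acc h
      · apply ihe
        split
        · exact hacc1
        · exact hacc1
  | succ r ihr =>
    intro els
    induction els with
    | nil => intro li cur acc h; simpa [dfsLoop] using h
    | cons el rest ihe =>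
      intro li cur acc h
      rw [dfsLoop]
      have hacc1 : (if (cur ++ [el]).length = sl.length then
          PySem.Set.add acc (PySem.List.sorted (cur ++ [el]) (fun x => x)) else acc).Nodup := by
        split
        · exact PySem.Set.nodup_add _ _ h
        · exact h
      split
      · exact ihe li cur acc h
      · apply ihe
        split
        · exact ihr _ _ _ _ hacc1
        · exact hacc1

-- membership in A's dfs result
lemma mem_dfsLoop (sl : List (List String)) : ∀ (rem : Nat) (els : List String) (li : Nat)
    (cur : List String) (acc : PySem.Set (List String)) (y : List String),
    rem + li = sl.length → li < sl.length → cur.Nodup → cur.length = li →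
    (y ∈ dfsLoop sl rem li els cur acc ↔
      y ∈ acc ∨ ∃ t ∈ prodR (els :: sl.drop (li + 1)), (cur ++ t).Nodup ∧
        y = PySem.List.sorted (cur ++ t) (fun x => x)) := by
  intro rem
  induction rem with
  | zero => intro els li cur acc y h1 h2; omega
  | succ r ihr =>
    intro els
    induction els with
    | nil =>
      intro li cur acc y h1 h2 h3 h4
      simp [dfsLoop, prodR]
    | cons el rest ihe =>
      intro li cur acc y h1 h2 h3 h4
      rw [dfsLoop]
      by_cases hel : el ∈ cur
      · rw [if_pos hel, ihe li cur acc y h1 h2 h3 h4, prodR_cons_cons]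
        have hfalse : ∀ t' : List String, ¬ (cur ++ el :: t').Nodup := by
          intro t' hnd
          rcases List.nodup_append.mp hnd with ⟨-, -, hdisj⟩
          exact hdisj el hel el (by simp) rfl
        simp only [List.mem_append, List.mem_map]
        constructor
        · rintro (h | ⟨t, ht, hnd, hy⟩)
          · exact Or.inl h
          · exact Or.inr ⟨t, Or.inr ht, hnd, hy⟩
        · rintro (h | ⟨t, (⟨t', ht', rfl⟩ | ht), hnd, hy⟩)
          · exact Or.inl h
          · exact absurd hnd (hfalse t')
          · exact Or.inr ⟨t, ht, hnd, hy⟩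
      · rw [if_neg hel]
        simp only []
        have hcur' : (cur ++ [el]).Nodup := by
          simp [List.nodup_append, h3]
          intro a ha heq
          subst heq; exact hel ha
        have hlen' : (cur ++ [el]).length = li + 1 := by simp [h4]
        by_cases hlt : li + 1 < sl.length
        · -- not the last level: acc1 = acc, recurse deeper
          rw [if_neg (by omega : ¬ (cur ++ [el]).length = sl.length), if_pos hlt]
          rw [ihe li cur _ y h1 h2 h3 h4]
          rw [ihr (sl.getD (li + 1) []) (li + 1) (cur ++ [el]) acc y (by omega) hlt hcur' hlen']
          have hdrop : sl.getD (li + 1) [] :: sl.drop (li + 1 + 1) = sl.drop (li + 1) := by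
            rw [List.getD_eq_getElem sl [] hlt]
            exact (List.drop_eq_getElem_cons hlt).symm
          rw [hdrop, prodR_cons_cons]
          simp only [List.mem_append, List.mem_map]
          constructor
          · rintro ((h | ⟨t', ht', hnd, hy⟩) | ⟨t, ht, hnd, hy⟩)
            · exact Or.inl h
            · exact Or.inr ⟨el :: t', Or.inl ⟨t', ht', rfl⟩, by simpa using hnd, by simpa using hy⟩
            · exact Or.inr ⟨t, Or.inr ht, hnd, hy⟩
          · rintro (h | ⟨t, (⟨t', ht', rfl⟩ | ht), hnd, hy⟩)
            · exact Or.inl (Or.inl h)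
            · exact Or.inl (Or.inr ⟨t', ht', by simpa using hnd, by simpa using hy⟩)
            · exact Or.inr ⟨t, ht, hnd, hy⟩
        · -- last level: li + 1 = sl.length, r = 0, the add fires
          rw [if_pos (by omega : (cur ++ [el]).length = sl.length), if_neg hlt]
          rw [ihe li cur _ y h1 h2 h3 h4]
          have hdrop : sl.drop (li + 1) = [] := List.drop_of_length_le (by omega)
          rw [hdrop, prodR_cons_cons]
          simp only [List.mem_append, List.mem_map, PySem.Set.mem_add, prodR, List.mem_singleton]
          constructor
          · rintro ((h | rfl) | ⟨t, ht, hnd, hy⟩)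
            · exact Or.inl h
            · exact Or.inr ⟨[el], Or.inl ⟨[], rfl, rfl⟩, hcur', rfl⟩
            · exact Or.inr ⟨t, Or.inr ht, hnd, hy⟩
          · rintro (h | ⟨t, (⟨t', rfl, rfl⟩ | ht), hnd, hy⟩)
            · exact Or.inl (Or.inl h)
            · exact Or.inl (Or.inr hy)
            · exact Or.inr ⟨t, ht, hnd, hy⟩

-- ===== VERDICT (by name: the statement is the Claim_ definition above) =====
theorem solution_spec : Claim_equal_solution := by
  intro user_ids banned_ids _hdom hpre
  unfold Spec_solution solution solution_alt
  simp only []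
  rw [sl_eq user_ids banned_ids]
  set sl := banned_ids.map (fun b => user_ids.filter (fun u => matchB b u)) with hsl
  have hn : 0 < sl.length := by
    rw [hsl]
    simp only [List.length_map]
    exact List.length_pos_of_ne_nil hpre
  have hcombos : sl.foldl (fun combos lst =>
      combos.flatMap (fun c => (lst.filter (fun u => u ∉ c)).map (fun u => c ++ [u]))) [[]]
      = ext [] sl := by
    rw [foldl_prodP]
    simp
  rw [hcombos]
  have hdrop0 : sl.getD 0 [] :: sl.drop 1 = sl := by
    rw [List.getD_eq_getElem sl [] hn]
    exact (List.drop_eq_getElem_cons hn).symm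
  have hmemA : ∀ y, y ∈ dfsLoop sl sl.length 0 (sl.getD 0 []) [] PySem.Set.empty ↔
      ∃ t ∈ prodR sl, t.Nodup ∧ y = PySem.List.sorted t (fun x => x) := by
    intro y
    rw [mem_dfsLoop sl sl.length (sl.getD 0 []) 0 [] PySem.Set.empty y (by omega) hn List.nodup_nil rfl]
    rw [show (0 : Nat) + 1 = 1 by rfl, hdrop0]
    simp [PySem.Set.empty]
  have hmemB : ∀ y, y ∈ (ext [] sl).foldl (fun r c => PySem.Set.add r (PySem.List.sorted c (fun x => x)))
      PySem.Set.empty ↔ ∃ t ∈ prodR sl, t.Nodup ∧ y = PySem.List.sorted t (fun x => x) := by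
    intro y
    rw [PySem.Set.mem_foldl_add]
    constructor
    · rintro (h | ⟨c, hc, rfl⟩)
      · exact absurd h (List.not_mem_nil)
      · rcases (mem_ext sl [] c List.nodup_nil).mp hc with ⟨hp, hnd⟩
        exact ⟨c, hp, by simpa using hnd, rfl⟩
    · rintro ⟨t, hp, hnd, rfl⟩
      exact Or.inr ⟨t, (mem_ext sl [] t List.nodup_nil).mpr ⟨hp, by simpa using hnd⟩, rfl⟩
  have hndA : (dfsLoop sl sl.length 0 (sl.getD 0 []) [] PySem.Set.empty).Nodup :=
    dfs_nodup sl _ _ _ _ _ List.nodup_nil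
  have hndB : ((ext [] sl).foldl (fun r c => PySem.Set.add r (PySem.List.sorted c (fun x => x)))
      PySem.Set.empty).Nodup := by
    rw [← PySem.Set.update_map_eq_foldl_add]
    exact PySem.Set.nodup_update _ _ List.nodup_nil
  have hperm := (List.perm_ext_iff_of_nodup hndA hndB).mpr (fun y => by rw [hmemA y, hmemB y])
  exact_mod_cast hperm.length_eq
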